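-- pv_equiv track=rewrite | github.com/UndiFineD/PyAgent | src/core/base/lifecycle/agent_core.py | score_improvement_items
-- ===== SOURCE A (Python) =====
-- def score_improvement_items(items: list[str]) -> list[str]:
--     """Heuristic-based scoring to prioritize items."""
--     prioritized = []
--     remaining = []
--
--     for item in items:
--         it_low = item.lower()
--         if any(
--             word in it_low
--             for word in ["security", "vulnerability", "crash", "critical"]
--         ):
--             prioritized.append(item)
--         else:
--             remaining.append(item)
--
--     return prioritized + remaining
-- ===== SOURCE B (Python) =====
-- def score_improvement_items(items: list[str]) -> list[str]:
--     """Heuristic-based scoring to prioritize items."""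
--     return sorted(
--         items,
--         key=lambda item: not any(
--             word in item.lower()
--             for word in ["security", "vulnerability", "crash", "critical"]
--         ),
--     )
-- ===== Notes on version B (the rewrite author's own statement) =====
-- stated objective: idiomatic
-- what changed: Replaces the explicit two-bucket partition loop with a single stable sort on a boolean key (prioritized items sort first), relying on sort stability to preserve relative order.
import Mathlib
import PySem

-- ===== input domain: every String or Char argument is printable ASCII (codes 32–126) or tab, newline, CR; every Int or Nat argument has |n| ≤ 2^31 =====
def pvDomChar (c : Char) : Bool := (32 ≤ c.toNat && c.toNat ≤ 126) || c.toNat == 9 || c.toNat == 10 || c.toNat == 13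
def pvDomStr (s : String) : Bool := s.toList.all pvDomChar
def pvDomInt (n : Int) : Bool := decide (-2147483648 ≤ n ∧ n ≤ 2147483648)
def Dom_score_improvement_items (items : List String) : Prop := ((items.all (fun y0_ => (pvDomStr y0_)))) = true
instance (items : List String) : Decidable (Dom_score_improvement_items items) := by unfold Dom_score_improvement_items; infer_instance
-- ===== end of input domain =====

-- B replaces A's explicit two-bucket partition loop with one stable sort on a
-- boolean key (idiomatic; no speed claim); return values proved equal on all inputs.


-- shared helper: the identical keyword test both Python sources spell out:
-- any(word in item.lower() for word in ["security","vulnerability","crash","critical"])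
def pvPrio (item : String) : Bool :=
  ["security", "vulnerability", "crash", "critical"].any
    (fun word => PySem.Str.isIn word (PySem.Str.lower item))

-- ===== PORT A =====
def score_improvement_items (items : List String) : List String :=
  let st : List String × List String :=
    items.foldl
      (fun acc item =>
        if pvPrio item then (acc.1 ++ [item], acc.2) else (acc.1, acc.2 ++ [item]))
      ([], [])
  st.1 ++ st.2

-- ===== PORT B =====
def score_improvement_items_alt (items : List String) : List String :=
  PySem.List.sorted items (fun item => !pvPrio item) false

-- ===== PRECONDITION & SPEC =====
def Spec_score_improvement_items (items : List String) (out : List String) : Prop := out = score_improvement_items_alt items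
instance (items : List String) (out : List String) : Decidable (Spec_score_improvement_items items out) := by unfold Spec_score_improvement_items; infer_instance

-- ===== CLAIM (what is proved, stated in full; the proofs are below) =====
def Claim_equal_score_improvement_items : Prop := ∀ (items : List String), Dom_score_improvement_items items → Spec_score_improvement_items items (score_improvement_items items)

-- ===== LEMMAS AND PROOFS =====

-- insertBy into p ++ r where x must not go before anything in p and goes before all of r
lemma pv_insertBy_split {α : Type} (before : α → α → Bool) (x : α) (p r : List α)
    (hp : ∀ y ∈ p, before x y = false) (hr : ∀ y ∈ r, before x y = true) :
    PySem.List.insertBy before x (p ++ r) = p ++ x :: r := by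
  induction p with
  | nil =>
    cases r with
    | nil => simp [PySem.List.insertBy]
    | cons y ys => simp [PySem.List.insertBy, hr y (by simp)]
  | cons a p' ih =>
    simp [List.cons_append, PySem.List.insertBy, hp a (by simp),
      ih (fun y hy => hp y (by simp [hy]))]

-- the insertion-sort loop of B, run from a state p ++ r (p prioritized, r not),
-- produces the stable partition
lemma pv_sorted_loop (xs p r : List String)
    (hp : ∀ y ∈ p, pvPrio y = true) (hr : ∀ y ∈ r, pvPrio y = false) :
    xs.foldl
      (fun acc x =>
        PySem.List.insertBy (fun a b => decide ((!pvPrio a) < (!pvPrio b))) x acc)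
      (p ++ r)
      = (p ++ xs.filter pvPrio) ++ (r ++ xs.filter (fun a => !pvPrio a)) := by
  induction xs generalizing p r with
  | nil => simp
  | cons x xs ih =>
    simp only [List.foldl_cons]
    by_cases h : pvPrio x
    · rw [pv_insertBy_split _ x p r
        (fun y hy => by simp [h, hp y hy])
        (fun y hy => by simp [h, hr y hy])]
      have := ih (p ++ [x]) r
        (fun y hy => by
          rcases List.mem_append.mp hy with hy | hy
          · exact hp y hy
          · simp at hy; simpa [hy] using h)
        hr
      simp only [List.append_assoc, List.singleton_append] at this ⊢
      rw [this]
      simp [h]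
    · have hsplit : PySem.List.insertBy (fun a b => decide ((!pvPrio a) < (!pvPrio b))) x (p ++ r)
          = p ++ (r ++ [x]) := by
        have := pv_insertBy_split (fun a b => decide ((!pvPrio a) < (!pvPrio b))) x (p ++ r) []
          (fun y hy => by
            rcases List.mem_append.mp hy with hy | hy
            · simp [h, hp y hy]
            · simp [h, hr y hy])
          (fun y hy => by simp at hy)
        simpa using this
      rw [hsplit]
      have := ih p (r ++ [x]) hp
        (fun y hy => by
          rcases List.mem_append.mp hy with hy | hy
          · exact hr y hy
          · simp at hy; subst hy; simpa using h)
      simp only [List.append_assoc, List.singleton_append] at this ⊢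
      rw [this]
      simp [h]

-- A's partition loop, characterised from any starting state
lemma pv_partition_loop (xs : List String) (p r : List String) :
    xs.foldl
      (fun (acc : List String × List String) item =>
        if pvPrio item then (acc.1 ++ [item], acc.2) else (acc.1, acc.2 ++ [item]))
      (p, r)
      = (p ++ xs.filter pvPrio, r ++ xs.filter (fun a => !pvPrio a)) := by
  induction xs generalizing p r with
  | nil => simp
  | cons x xs ih =>
    by_cases h : pvPrio x
    · simp [List.foldl_cons, h, ih]
    · simp [List.foldl_cons, h, ih]

-- ===== VERDICT (by name: the statement is the Claim_ definition above) =====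
theorem score_improvement_items_spec : Claim_equal_score_improvement_items := by
  intro items _
  unfold Spec_score_improvement_items score_improvement_items score_improvement_items_alt
  rw [PySem.List.sorted_eq_foldl_insertBy]
  have hb := pv_sorted_loop items [] [] (by simp) (by simp)
  simp only [List.nil_append] at hb
  rw [hb, pv_partition_loop items [] []]
  simp
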